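-- pv_equiv track=rewrite | github.com/ashinberish/keep-coins | backend/app/core/email.py | _render_otp_digits
-- ===== SOURCE A (Python) =====
-- def _render_otp_digits(code: str) -> str:
--     cells = []
--     for i, digit in enumerate(code):
--         if i == 3:
--             cells.append(
--                 '<td style="padding: 0 6px; font-size: 22px; color: #9ca3af;">'
--                 "&ndash;"
--                 "</td>"
--             )
--         cells.append(
--             '<td style="'
--             "padding: 0 4px;"
--             '">'
--             '<div style="'
--             "width: 44px;"
--             "height: 52px;"
--             "line-height: 52px;"
--             "text-align: center;"
--             "font-size: 26px;"
--             "font-weight: 700;"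
--             "color: #111827;"
--             "background-color: #f3f4f6;"
--             "border-radius: 8px;"
--             "border: 1px solid #e5e7eb;"
--             "font-family: 'Segoe UI', Arial, monospace;"
--             f'">{digit}</div>'
--             "</td>"
--         )
--     return "".join(cells)
-- ===== SOURCE B (Python) =====
-- _SEP_CELL = '<td style="padding: 0 6px; font-size: 22px; color: #9ca3af;">&ndash;</td>'
--
-- _DIGIT_CELL = (
--     '<td style="padding: 0 4px;">'
--     '<div style="'
--     "width: 44px;"
--     "height: 52px;"
--     "line-height: 52px;"
--     "text-align: center;"
--     "font-size: 26px;"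
--     "font-weight: 700;"
--     "color: #111827;"
--     "background-color: #f3f4f6;"
--     "border-radius: 8px;"
--     "border: 1px solid #e5e7eb;"
--     "font-family: 'Segoe UI', Arial, monospace;"
--     '">{}</div>'
--     "</td>"
-- )
--
--
-- def _cells(digits: str) -> str:
--     return "".join(_DIGIT_CELL.format(d) for d in digits)
--
--
-- def _render_otp_digits(code: str) -> str:
--     first, second = code[:3], code[3:]
--     if not second:
--         return _cells(first)
--     return _cells(first) + _SEP_CELL + _cells(second)
-- ===== Notes on version B (the rewrite author's own statement) =====
-- stated objective: simpler
-- what changed: Replaces the indexed enumerate loop with its i == 3 separator check by a split-into-groups decomposition: slice the code into code[:3] and code[3:], render each group with a shared join-over-template helper, and insert the separator cell between the two groups only when the second is non-empty.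
import Mathlib
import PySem

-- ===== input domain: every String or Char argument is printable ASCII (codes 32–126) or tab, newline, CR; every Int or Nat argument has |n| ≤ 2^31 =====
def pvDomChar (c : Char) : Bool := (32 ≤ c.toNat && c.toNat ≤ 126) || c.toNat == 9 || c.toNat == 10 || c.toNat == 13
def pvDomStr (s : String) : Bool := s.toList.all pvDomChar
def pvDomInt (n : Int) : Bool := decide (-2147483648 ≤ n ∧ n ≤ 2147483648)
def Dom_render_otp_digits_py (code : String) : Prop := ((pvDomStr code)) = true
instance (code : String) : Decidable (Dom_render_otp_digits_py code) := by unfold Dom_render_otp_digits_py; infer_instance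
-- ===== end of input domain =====

-- B renders the two digit groups code[:3] / code[3:] by slicing and a shared cell helper
-- instead of A's indexed loop with an i == 3 separator check (objective: simpler decomposition).

-- shared HTML string constants (A's and B's Python both spell out these same literals)
def pvSepCell : String :=
  "<td style=\"padding: 0 6px; font-size: 22px; color: #9ca3af;\">&ndash;</td>"

def pvDigitCell (d : Char) : String :=
  "<td style=\"padding: 0 4px;\"><div style=\"width: 44px;height: 52px;line-height: 52px;text-align: center;font-size: 26px;font-weight: 700;color: #111827;background-color: #f3f4f6;border-radius: 8px;border: 1px solid #e5e7eb;font-family: 'Segoe UI', Arial, monospace;\">"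
    ++ String.singleton d ++ "</div></td>"

-- ===== PORT A =====
def render_otp_digits_py (code : String) : String :=
  let cells := (PySem.List.enumerate code.toList).foldl
    (fun cells p => (if p.1 == 3 then cells ++ [pvSepCell] else cells) ++ [pvDigitCell p.2]) []
  PySem.Str.join "" cells

-- ===== PORT B =====
def pvCellsOf (digits : String) : String :=
  PySem.Str.join "" (digits.toList.map pvDigitCell)

def render_otp_digits_py_alt (code : String) : String :=
  let first := PySem.Str.slice code none (some 3)
  let second := PySem.Str.slice code (some 3) none
  if second == "" then pvCellsOf first
  else pvCellsOf first ++ pvSepCell ++ pvCellsOf second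

-- ===== PRECONDITION & SPEC =====
def Spec_render_otp_digits_py (code : String) (out : String) : Prop := out = render_otp_digits_py_alt code
instance (code : String) (out : String) : Decidable (Spec_render_otp_digits_py code out) := by unfold Spec_render_otp_digits_py; infer_instance

-- ===== CLAIM (what is proved, stated in full; the proofs are below) =====
def Claim_equal_render_otp_digits_py : Prop := ∀ (code : String), Dom_render_otp_digits_py code → Spec_render_otp_digits_py code (render_otp_digits_py code)

-- ===== LEMMAS AND PROOFS =====

theorem pv_join_nilsep (css : List (List Char)) : PySem.Chars.join [] css = css.flatten := by
  induction css with
  | nil => rfl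
  | cons c cs ih => cases cs <;> simp_all [PySem.Chars.join, List.intercalate]

-- A's loop past index 3 only appends digit cells
theorem pvA_tail (rest : List Char) : ∀ (k : ℤ) (acc : List String), 4 ≤ k →
    (PySem.List.enumerate rest k).foldl
      (fun cells p => (if p.1 == 3 then cells ++ [pvSepCell] else cells) ++ [pvDigitCell p.2]) acc
      = acc ++ rest.map pvDigitCell := by
  induction rest with
  | nil => intro k acc _; simp [PySem.List.enumerate_nil]
  | cons d rest ih =>
      intro k acc hk
      rw [PySem.List.enumerate_cons, List.foldl_cons, ih (k + 1) _ (by omega),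
        if_neg (by simp only [beq_iff_eq]; omega : ¬(k == 3) = true)]
      simp

-- characterisation of A's cell list: three leading cells, then a separator and the rest
theorem pvA_cells (l : List Char) :
    (PySem.List.enumerate l).foldl
      (fun cells p => (if p.1 == 3 then cells ++ [pvSepCell] else cells) ++ [pvDigitCell p.2]) []
      = (l.take 3).map pvDigitCell ++
        (if l.drop 3 = [] then [] else pvSepCell :: (l.drop 3).map pvDigitCell) := by
  match l with
  | [] => simp [PySem.List.enumerate_nil]
  | [a] => simp [PySem.List.enumerate_cons, PySem.List.enumerate_nil]
  | [a, b] => simp [PySem.List.enumerate_cons, PySem.List.enumerate_nil]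
  | [a, b, c] => simp [PySem.List.enumerate_cons, PySem.List.enumerate_nil]
  | a :: b :: c :: d :: rest =>
      simp only [PySem.List.enumerate_cons, List.foldl_cons]
      rw [pvA_tail rest (0 + 1 + 1 + 1 + 1) _ (by norm_num)]
      norm_num
      intro hfalse
      exact absurd hfalse (List.cons_ne_nil d rest)

theorem pv_slice_to (l : List Char) : PySem.List.slice l none (some 3) = l.take 3 :=
  PySem.List.slice_to l (by omega)

theorem pv_slice_from (l : List Char) : PySem.List.slice l (some 3) none = l.drop 3 :=
  PySem.List.slice_from l (by omega)

-- ===== VERDICT (by name: the statement is the Claim_ definition above) =====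
theorem render_otp_digits_py_spec : Claim_equal_render_otp_digits_py := by
  intro code _
  unfold Spec_render_otp_digits_py render_otp_digits_py render_otp_digits_py_alt pvCellsOf
  rw [pvA_cells]
  by_cases h : code.toList.drop 3 = []
  · have hsec : PySem.Str.slice code (some 3) none = "" := by
      rw [← String.toList_inj]
      simp [pv_slice_from, h]
    have htake : code.toList.take 3 = code.toList := by
      have := List.take_append_drop 3 code.toList
      simpa [h] using this
    simp [h, hsec, pv_slice_to, htake]

  · have hsec : (PySem.Str.slice code (some 3) none == "") = false := by
      simp only [beq_eq_false_iff_ne, ne_eq, ← String.toList_inj]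
      simpa [pv_slice_from] using h
    rw [← String.toList_inj]
    simp [h, hsec, PySem.Str.toList_join, pv_join_nilsep, pv_slice_to, pv_slice_from,
      String.toList_append, List.map_take, List.map_drop]
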